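-- pv_equiv track=rewrite | github.com/giangpth/ShapleyValueForBooleanNetwork | vis/utilities.py | rank_dict_values
-- ===== SOURCE A (Python) =====
-- def rank_dict_values(d):
--     # Sort items by value descending
--     sorted_items = sorted(d.items(), key=lambda x: -x[1])
--
--     ranks = {}
--     current_rank = 1
--     last_value = None
--
--     for key, value in sorted_items:
--         if value != last_value:
--             last_value = value
--             ranks[key] = current_rank
--             current_rank += 1
--         else:
--             ranks[key] = current_rank - 1  # Same as previous rank
--
--     return ranks
-- ===== SOURCE B (Python) =====
-- def rank_dict_values(d):
--     # Build a value -> dense rank table over the distinct values (descending),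
--     # then map each item through the table.
--     items = sorted(d.items(), key=lambda kv: kv[1], reverse=True)
--     values_desc = sorted(set(d.values()), reverse=True)
--     table = {}
--     for i, v in enumerate(values_desc):
--         table[v] = i + 1
--     return {k: table[v] for k, v in items}
-- ===== Notes on version B (the rewrite author's own statement) =====
-- stated objective: alternative
-- what changed: A assigns dense ranks in one stateful scan carrying last_value/current_rank across the sorted items; B instead builds an explicit value-to-rank table over the distinct values sorted descending and maps every item through independent table lookups.
import Mathlib
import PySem

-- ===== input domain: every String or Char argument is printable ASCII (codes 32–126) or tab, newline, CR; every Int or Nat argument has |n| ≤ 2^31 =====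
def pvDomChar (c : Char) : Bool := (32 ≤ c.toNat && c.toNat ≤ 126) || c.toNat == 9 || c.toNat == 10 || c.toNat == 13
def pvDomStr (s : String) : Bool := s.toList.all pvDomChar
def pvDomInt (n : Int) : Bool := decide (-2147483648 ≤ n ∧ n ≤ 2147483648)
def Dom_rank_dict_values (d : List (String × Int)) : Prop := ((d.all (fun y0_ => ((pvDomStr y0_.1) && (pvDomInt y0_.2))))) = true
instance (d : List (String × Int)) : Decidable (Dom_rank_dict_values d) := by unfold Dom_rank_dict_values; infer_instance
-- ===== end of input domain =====

-- B replaces A's stateful rank-scan by building a value→rank table over the distinct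
-- values sorted descending and mapping each item through it (alternative decomposition).

-- ===== PORT A =====
def rank_dict_values (d : List (String × Int)) : List (String × Int) :=
  let sorted_items := PySem.List.sorted d (fun x => -x.2)
  let res := sorted_items.foldl
    (fun (st : PySem.Dict String Int × Int × Option Int) kv =>
      if some kv.2 ≠ st.2.2 then (st.1.insert kv.1 st.2.1, st.2.1 + 1, some kv.2)
      else (st.1.insert kv.1 (st.2.1 - 1), st.2.1, st.2.2))
    (PySem.Dict.empty, 1, none)
  res.1.items

-- ===== PORT B =====
def rank_dict_values_alt (d : List (String × Int)) : List (String × Int) :=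
  let items := PySem.List.sorted d (fun kv => kv.2) true
  let valuesDesc := PySem.List.sorted (PySem.Set.ofList (d.map (fun kv => kv.2))) (fun v => v) true
  let table := (PySem.List.enumerate valuesDesc).foldl
    (fun (t : PySem.Dict Int Int) iv => t.insert iv.2 (iv.1 + 1)) PySem.Dict.empty
  -- table[v]: every value of items is a key of table, so the .getD default is never reached
  (items.foldl (fun (r : PySem.Dict String Int) kv =>
    r.insert kv.1 ((table.get? kv.2).getD 0)) PySem.Dict.empty).items

-- ===== PRECONDITION & SPEC =====
def Spec_rank_dict_values (d : List (String × Int)) (out : List (String × Int)) : Prop := out = rank_dict_values_alt d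
instance (d : List (String × Int)) (out : List (String × Int)) : Decidable (Spec_rank_dict_values d out) := by unfold Spec_rank_dict_values; infer_instance

-- ===== CLAIM (what is proved, stated in full; the proofs are below) =====
def Claim_equal_rank_dict_values : Prop := ∀ (d : List (String × Int)), Dom_rank_dict_values d → Spec_rank_dict_values d (rank_dict_values d)

-- ===== LEMMAS AND PROOFS =====

-- The value list A assigns along the sorted items, as a pure list recursion.
def rankList : List (String × Int) → Int → Option Int → List (String × Int)
  | [], _, _ => []
  | kv :: t, c, lv =>
    if some kv.2 ≠ lv then (kv.1, c) :: rankList t (c + 1) (some kv.2)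
    else (kv.1, c - 1) :: rankList t c lv

-- A's fold factors: the dict is the insert-fold of rankList.
lemma foldA_fst (t : List (String × Int)) (r : PySem.Dict String Int) (c : Int) (lv : Option Int) :
    (t.foldl
      (fun (st : PySem.Dict String Int × Int × Option Int) kv =>
        if some kv.2 ≠ st.2.2 then (st.1.insert kv.1 st.2.1, st.2.1 + 1, some kv.2)
        else (st.1.insert kv.1 (st.2.1 - 1), st.2.1, st.2.2)) (r, c, lv)).1
    = (rankList t c lv).foldl (fun d p => d.insert p.1 p.2) r := by
  induction t generalizing r c lv with
  | nil => rfl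
  | cons kv t ih =>
    simp only [List.foldl_cons, rankList]
    by_cases h : some kv.2 = lv
    · simp only [h, ne_eq, not_true_eq_false, if_false]
      exact ih _ _ _
    · simp only [ne_eq, h, not_false_eq_true, if_pos]
      exact ih _ _ _

lemma foldl_add_sublist {α : Type} [BEq α] (l acc ys : List α) (h : acc.Sublist ys) :
    (l.foldl PySem.Set.add acc).Sublist (ys ++ l) := by
  induction l generalizing acc ys with
  | nil => simpa using h
  | cons x l ih =>
    have h2 : (PySem.Set.add acc x).Sublist (ys ++ [x]) := by
      simp only [PySem.Set.add]
      split
      · exact h.trans (List.sublist_append_left ys [x])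
      · exact h.append (List.Sublist.refl [x])
    simpa [List.append_assoc] using ih _ _ h2

lemma dedup_sublist {α : Type} [BEq α] (xs : List α) : (PySem.List.dedup xs).Sublist xs := by
  simpa [PySem.List.dedup_eq_ofList, PySem.Set.ofList_eq_foldl] using
    foldl_add_sublist xs [] [] (List.Sublist.refl [])

lemma foldl_add_prefix {α : Type} [BEq α] (l acc : List α) :
    ∃ r, l.foldl PySem.Set.add acc = acc ++ r := by
  induction l generalizing acc with
  | nil => exact ⟨[], by simp⟩
  | cons x l ih =>
    rcases ih (PySem.Set.add acc x) with ⟨r, hr⟩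
    simp only [List.foldl_cons]
    rw [hr]
    simp only [PySem.Set.add]
    split
    · exact ⟨r, rfl⟩
    · exact ⟨x :: r, by simp⟩

lemma dedup_cons_head {α : Type} [BEq α] (x : α) (l : List α) :
    ∃ r, PySem.List.dedup (x :: l) = x :: r := by
  rcases foldl_add_prefix l [x] with ⟨r, hr⟩
  refine ⟨r, ?_⟩
  rw [PySem.List.dedup_eq_ofList, PySem.Set.ofList_eq_foldl]
  simp only [List.foldl_cons]
  have : PySem.Set.add [] x = [x] := by simp [PySem.Set.add]
  rw [this, hr]
  simp

lemma dedup_pairwise_gt (l : List Int) (h : l.Pairwise (fun a b => b ≤ a)) :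
    (PySem.List.dedup l).Pairwise (· > ·) := by
  have hge : (PySem.List.dedup l).Pairwise (fun a b => b ≤ a) := h.sublist (dedup_sublist l)
  have hnd : (PySem.List.dedup l).Nodup := PySem.List.nodup_dedup l
  exact (hge.and hnd).imp (fun h => lt_of_le_of_ne h.1 (Ne.symm h.2))

lemma eq_of_pairwise_gt_of_mem_iff (l₁ l₂ : List Int)
    (h₁ : l₁.Pairwise (· > ·)) (h₂ : l₂.Pairwise (· > ·)) (hm : ∀ x, x ∈ l₁ ↔ x ∈ l₂) :
    l₁ = l₂ := by
  have n1 : l₁.Nodup := h₁.imp (fun h => ne_of_gt h)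
  have n2 : l₂.Nodup := h₂.imp (fun h => ne_of_gt h)
  exact List.eq_of_perm_of_sorted (fun a b _ _ hab hba => ((lt_asymm hab) hba).elim) h₁ h₂
    ((List.perm_ext_iff_of_nodup n1 n2).mpr hm)

-- one scan step on the dedup invariant
lemma dedup_step (w : List Int) (hw : w.Pairwise (· > ·)) (j : Nat) (hj : j < w.length)
    (t : List Int) (hge : t.Pairwise (fun a b => b ≤ a))
    (hdd : PySem.List.dedup (w[j] :: t) = w.drop j) :
    PySem.List.dedup t = w.drop j ∨ PySem.List.dedup t = w.drop (j + 1) := by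
  have hdrop : w.drop j = w[j] :: w.drop (j + 1) := List.drop_eq_getElem_cons hj
  have hwnd : w.Nodup := hw.imp (fun h => ne_of_gt h)
  have hdnd : (w.drop j).Nodup := hwnd.sublist (List.drop_sublist j w)
  have hnotmem : w[j] ∉ w.drop (j + 1) := by
    rw [hdrop] at hdnd
    exact (List.nodup_cons.mp hdnd).1
  have hmem_t : ∀ x, x ∈ PySem.List.dedup t ↔ x ∈ t := fun x => PySem.List.mem_dedup t x
  have hmem_all : ∀ x, x ∈ w[j] :: t ↔ x ∈ w.drop j := by
    intro x
    rw [← hdd]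
    exact (PySem.List.mem_dedup _ x).symm
  have hgt_dt : (PySem.List.dedup t).Pairwise (· > ·) := dedup_pairwise_gt t hge
  have hgt_dj : (w.drop j).Pairwise (· > ·) := hw.sublist (List.drop_sublist j w)
  have hgt_dj1 : (w.drop (j + 1)).Pairwise (· > ·) := hw.sublist (List.drop_sublist (j + 1) w)
  by_cases hmem : w[j] ∈ PySem.List.dedup t
  · left
    refine eq_of_pairwise_gt_of_mem_iff _ _ hgt_dt hgt_dj (fun x => ?_)
    constructor
    · intro hx
      exact (hmem_all x).mp (List.mem_cons_of_mem _ ((hmem_t x).mp hx))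
    · intro hx
      rw [hdrop] at hx
      rcases List.mem_cons.mp hx with h | h
      · exact h ▸ hmem
      · have hxt : x ∈ w[j] :: t := (hmem_all x).mpr (hdrop ▸ List.mem_cons_of_mem _ h)
        rcases List.mem_cons.mp hxt with h' | h'
        · exact absurd (h' ▸ h) hnotmem
        · exact (hmem_t x).mpr h'
  · right
    refine eq_of_pairwise_gt_of_mem_iff _ _ hgt_dt hgt_dj1 (fun x => ?_)
    constructor
    · intro hx
      have hxt : x ∈ t := (hmem_t x).mp hx
      have : x ∈ w.drop j := (hmem_all x).mp (List.mem_cons_of_mem _ hxt)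
      rw [hdrop] at this
      rcases List.mem_cons.mp this with h | h
      · exact absurd (h ▸ hx) hmem
      · exact h
    · intro hx
      have hxne : x ≠ w[j] := fun h => hnotmem (h ▸ hx)
      have : x ∈ w[j] :: t := (hmem_all x).mpr (hdrop ▸ List.mem_cons_of_mem _ hx)
      rcases List.mem_cons.mp this with h | h
      · exact absurd h hxne
      · exact (hmem_t x).mpr h

-- the central invariant: A's running ranks agree with the table lookup
lemma rankList_spec (w : List Int) (hw : w.Pairwise (· > ·)) (g : Int → Int)
    (hg : ∀ (j : Nat) (hj : j < w.length), g w[j] = (j : Int) + 1) :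
    ∀ (t : List (String × Int)) (j : Nat) (lv : Option Int),
      t.Pairwise (fun a b => b.2 ≤ a.2) →
      ((PySem.List.dedup (t.map (fun kv => kv.2)) = w.drop j ∧
          ∀ (hj : j < w.length), lv ≠ some w[j]) ∨
        (∃ _hj : j - 1 < w.length, 1 ≤ j ∧
          PySem.List.dedup (t.map (fun kv => kv.2)) = w.drop (j - 1) ∧ lv = some (w[j - 1]'(by omega)))) →
      rankList t ((j : Int) + 1) lv = t.map (fun kv => (kv.1, g kv.2)) := by
  intro t
  induction t with
  | nil => intro j lv _ _; rfl
  | cons kv t ih =>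
    intro j lv hdesc H
    have hd' : t.Pairwise (fun a b => b.2 ≤ a.2) := hdesc.of_cons
    have hgemap : (t.map (fun kv => kv.2)).Pairwise (fun a b => b ≤ a) :=
      List.pairwise_map.mpr ((List.pairwise_cons.mp hdesc).2)
    rcases dedup_cons_head kv.2 (t.map (fun kv => kv.2)) with ⟨rest, hrest⟩
    rcases H with ⟨hdd, hne⟩ | ⟨hj1, hj2, hdd, hlv⟩
    · -- fresh: head is a new distinct value w[j]
      have hdd' : PySem.List.dedup (kv.2 :: t.map (fun kv => kv.2)) = w.drop j := by
        simpa using hdd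
      have hjlt : j < w.length := by
        by_contra h
        rw [List.drop_eq_nil_of_le (by omega)] at hdd'
        rw [hrest] at hdd'
        exact List.cons_ne_nil _ _ hdd'
      have hdrop : w.drop j = w[j] :: w.drop (j + 1) := List.drop_eq_getElem_cons hjlt
      have hhead : kv.2 = w[j] := by
        rw [hrest, hdrop] at hdd'
        exact (List.cons.injEq _ _ _ _ ▸ hdd').1
      have hcond : some kv.2 ≠ lv := fun h => (hne hjlt) (hhead ▸ h.symm)
      rw [rankList, if_pos hcond]
      have hgv : g kv.2 = (j : Int) + 1 := hhead ▸ hg j hjlt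
      have hstep := dedup_step w hw j hjlt (t.map (fun kv => kv.2)) hgemap (hhead ▸ hdd')
      have hrec : rankList t (((j : Int) + 1) + 1) (some kv.2)
          = t.map (fun kv => (kv.1, g kv.2)) := by
        have hcast : ((j : Int) + 1) + 1 = ((j + 1 : Nat) : Int) + 1 := by push_cast; ring
        rw [hcast]
        refine ih (j + 1) (some kv.2) hd' ?_
        rcases hstep with h | h
        · right
          refine ⟨by simpa using hjlt, by omega, ?_, ?_⟩
          · simpa using h
          · simp only [Nat.add_sub_cancel]
            exact congrArg some hhead
        · left
          refine ⟨h, fun hj2 h2 => ?_⟩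
          have : w[j] > w[j + 1] := List.pairwise_iff_getElem.mp hw j (j + 1) hjlt hj2 (by omega)
          have : kv.2 ≠ w[j + 1] := by omega
          exact this (Option.some.injEq _ _ ▸ h2)
      rw [hrec]
      simp [hgv]
    · -- run: head repeats the previous distinct value w[j-1]
      have hdd' : PySem.List.dedup (kv.2 :: t.map (fun kv => kv.2)) = w.drop (j - 1) := by
        simpa using hdd
      have hdrop : w.drop (j - 1) = w[j - 1]'(by omega) :: w.drop (j - 1 + 1) :=
        List.drop_eq_getElem_cons hj1
      have hhead : kv.2 = w[j - 1]'(by omega) := by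
        rw [hrest, hdrop] at hdd'
        exact (List.cons.injEq _ _ _ _ ▸ hdd').1
      have hcond : ¬ (some kv.2 ≠ lv) := by
        rw [hlv, hhead]
        simp
      rw [rankList, if_neg hcond]
      have hgv : g kv.2 = (j : Int) := by
        have := hg (j - 1) hj1
        rw [hhead, this]
        have : ((j - 1 : Nat) : Int) = (j : Int) - 1 := by omega
        omega
      have hstep := dedup_step w hw (j - 1) hj1 (t.map (fun kv => kv.2)) hgemap (hhead ▸ hdd')
      have hrec : rankList t ((j : Int) + 1) lv = t.map (fun kv => (kv.1, g kv.2)) := by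
        refine ih j lv hd' ?_
        rcases hstep with h | h
        · right
          exact ⟨hj1, hj2, h, hlv⟩
        · left
          have hjeq : j - 1 + 1 = j := by omega
          refine ⟨hjeq ▸ h, fun hjl h2 => ?_⟩
          have : w[j - 1]'(by omega) > w[j] :=
            List.pairwise_iff_getElem.mp hw (j - 1) j hj1 hjl (by omega)
          rw [hlv] at h2
          have := Option.some.injEq (w[j - 1]'(by omega)) (w[j]) ▸ h2
          omega
      rw [hrec]
      have : (j : Int) + 1 - 1 = g kv.2 := by rw [hgv]; ring
      simp [this]

-- the value→rank table: get? on the enumerate fold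
lemma table_get_aux (vs : List Int) (hn : vs.Nodup) (s0 : Int) (t0 : PySem.Dict Int Int) (v : Int) :
    ((PySem.List.enumerate vs s0).foldl
        (fun (t : PySem.Dict Int Int) iv => t.insert iv.2 (iv.1 + 1)) t0).get? v
      = if v ∈ vs then some (s0 + (vs.idxOf v : Int) + 1) else t0.get? v := by
  induction vs generalizing s0 t0 with
  | nil => simp [PySem.List.enumerate_nil]
  | cons x l ih =>
    rw [PySem.List.enumerate_cons]
    simp only [List.foldl_cons]
    rw [ih (List.nodup_cons.mp hn).2 (s0 + 1)]
    by_cases hvx : v = x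
    · subst hvx
      have hvl : v ∉ l := (List.nodup_cons.mp hn).1
      simp only [hvl, List.mem_cons, true_or, if_pos, ite_false]
      rw [PySem.Dict.get?_insert_self]
      simp
    · by_cases hvl : v ∈ l
      · simp only [hvl, if_pos, List.mem_cons, or_true]
        rw [List.idxOf_cons]
        have : (x == v) = false := by simp [Ne.symm hvx]
        rw [this]
        simp only [cond_false]
        push_cast
        ring_nf
      · rw [if_neg hvl, if_neg (by simp [hvx, hvl] : ¬ v ∈ x :: l), PySem.Dict.get?_insert]
        simp [hvx]

-- the two sorts in A and B produce the same list
lemma sort_eq (d : List (String × Int)) :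
    PySem.List.sorted d (fun kv => kv.2) true = PySem.List.sorted d (fun x => -x.2) := by
  rw [PySem.List.sorted_rev_eq_foldl_insertBy, PySem.List.sorted_eq_foldl_insertBy]
  congr 1
  funext acc x
  congr 1
  funext a b
  exact decide_eq_decide.mpr (by omega)

-- B's sorted distinct values are the dedup of A's sorted value list
lemma valuesDesc_eq (d : List (String × Int)) :
    PySem.List.sorted (PySem.Set.ofList (d.map (fun kv => kv.2))) (fun v => v) true
      = PySem.List.dedup ((PySem.List.sorted d (fun x => -x.2)).map (fun kv => kv.2)) := by
  set s := PySem.List.sorted d (fun x => -x.2) with hs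
  set w := PySem.List.dedup (s.map (fun kv => kv.2)) with hwdef
  have hperm : (s.map (fun kv => kv.2)).Perm (d.map (fun kv => kv.2)) :=
    (PySem.List.sorted_perm d (fun x => -x.2) false).map _
  have hsge : (s.map (fun kv => kv.2)).Pairwise (fun a b => b ≤ a) := by
    refine List.pairwise_map.mpr ?_
    exact (PySem.List.sorted_pairwise d (fun x => -x.2)).imp (fun h => by omega)
  have hwgt : w.Pairwise (· > ·) := dedup_pairwise_gt _ hsge
  refine PySem.List.sorted_rev_eq_of_perm_of_pairwise_gt _ _ _ ?_ ?_
  · refine (List.perm_ext_iff_of_nodup (PySem.List.nodup_dedup _) (PySem.Set.nodup_ofList _)).mpr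
      (fun x => ?_)
    rw [PySem.List.mem_dedup, PySem.Set.mem_ofList]
    exact ⟨fun h => hperm.mem_iff.mp h, fun h => hperm.mem_iff.mpr h⟩
  · exact hwgt

-- ===== VERDICT (by name: the statement is the Claim_ definition above) =====
theorem rank_dict_values_spec : Claim_equal_rank_dict_values := by
  unfold Claim_equal_rank_dict_values
  intro d _
  unfold Spec_rank_dict_values rank_dict_values rank_dict_values_alt
  simp only []
  rw [sort_eq d, valuesDesc_eq d]
  set s := PySem.List.sorted d (fun x => -x.2) with hs
  set w := PySem.List.dedup (s.map (fun kv => kv.2)) with hwdef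
  set table := (PySem.List.enumerate w).foldl
    (fun (t : PySem.Dict Int Int) iv => t.insert iv.2 (iv.1 + 1)) PySem.Dict.empty with htable
  have hsge : (s.map (fun kv => kv.2)).Pairwise (fun a b => b ≤ a) := by
    refine List.pairwise_map.mpr ?_
    exact (PySem.List.sorted_pairwise d (fun x => -x.2)).imp (fun h => by omega)
  have hdesc : s.Pairwise (fun a b => b.2 ≤ a.2) :=
    (PySem.List.sorted_pairwise d (fun x => -x.2)).imp (fun h => by omega)
  have hwgt : w.Pairwise (· > ·) := dedup_pairwise_gt _ hsge
  have hwnd : w.Nodup := PySem.List.nodup_dedup _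
  have hg : ∀ (j : Nat) (hj : j < w.length),
      ((table.get? w[j]).getD 0) = (j : Int) + 1 := by
    intro j hj
    rw [htable, table_get_aux w hwnd 0 PySem.Dict.empty]
    rw [if_pos (List.getElem_mem hj), List.Nodup.idxOf_getElem hwnd j hj]
    simp
  have hmain := rankList_spec w hwgt (fun v => (table.get? v).getD 0) hg s 0 none hdesc
    (Or.inl ⟨by rw [List.drop_zero, hwdef], fun _ h => by simp at h⟩)
  rw [foldA_fst]
  have h1 : rankList s 1 none = s.map (fun kv => (kv.1, (table.get? kv.2).getD 0)) := by
    simpa using hmain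
  rw [h1, List.foldl_map]
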